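-- pv_equiv track=rewrite | github.com/AbdelrahmanElnazly003/EduRecSys-Recommendation-System | app/main.py | filter_by_subject_priority
-- ===== SOURCE A (Python) =====
-- def filter_by_subject_priority(recommendations, subject, k):
--     if not subject:
--         return recommendations[:k]
--
--     subject_lower = subject.lower()
--
--     matched = [
--         r for r in recommendations
--         if subject_lower in r["subject"].lower()
--     ]
--
--     not_matched = [
--         r for r in recommendations
--         if subject_lower not in r["subject"].lower()
--     ]
--
--     return (matched + not_matched)[:k]
-- ===== SOURCE B (Python) =====
-- def filter_by_subject_priority(recommendations, subject, k):
--     if not subject: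
--         return recommendations[:k]
--
--     subject_lower = subject.lower()
--
--     # Stable sort by a boolean key: matched items (key False) come first,
--     # each group keeping its original relative order.
--     return sorted(
--         recommendations,
--         key=lambda r: subject_lower not in r["subject"].lower(),
--     )[:k]
-- ===== Notes on version B (the rewrite author's own statement) =====
-- stated objective: simpler
-- what changed: Replaces the two filtering passes (matched/not_matched comprehensions plus concatenation) by a single stable sort on the boolean key 'subject_lower not in r["subject"].lower()', whose stability yields exactly the matched-then-unmatched order.
import Mathlib
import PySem

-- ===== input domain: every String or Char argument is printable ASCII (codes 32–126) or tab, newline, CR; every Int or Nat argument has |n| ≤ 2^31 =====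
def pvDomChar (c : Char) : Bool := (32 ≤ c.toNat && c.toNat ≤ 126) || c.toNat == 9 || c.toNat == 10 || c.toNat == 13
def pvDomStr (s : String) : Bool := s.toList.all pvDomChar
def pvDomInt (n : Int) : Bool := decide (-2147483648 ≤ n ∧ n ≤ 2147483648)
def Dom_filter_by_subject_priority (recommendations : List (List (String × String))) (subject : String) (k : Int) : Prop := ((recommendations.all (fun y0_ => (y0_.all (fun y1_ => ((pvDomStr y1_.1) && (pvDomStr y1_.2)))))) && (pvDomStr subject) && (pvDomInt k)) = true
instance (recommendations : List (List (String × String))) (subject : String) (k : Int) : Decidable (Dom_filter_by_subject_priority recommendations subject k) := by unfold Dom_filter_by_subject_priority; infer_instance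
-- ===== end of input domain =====

-- B replaces A's two filtering passes by one stable sort on a boolean match key (objective: simpler).


-- ===== PORT A =====
-- r["subject"] : first-match lookup in the association list; Pre_ guarantees the key is present, so getD "" is never taken.
def pvSubjA (r : List (String × String)) : String :=
  ((PySem.Dict.mk r).get? "subject").getD ""

def pvMatchA (subject_lower : String) (r : List (String × String)) : Bool :=
  PySem.Str.isIn subject_lower (PySem.Str.lower (pvSubjA r))

def filter_by_subject_priority (recommendations : List (List (String × String))) (subject : String) (k : Int) : List (List (String × String)) :=
  if subject = "" then PySem.List.slice recommendations none (some k)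
  else
    let subject_lower := PySem.Str.lower subject
    let matched := recommendations.filter (fun r => pvMatchA subject_lower r)
    let not_matched := recommendations.filter (fun r => !(pvMatchA subject_lower r))
    PySem.List.slice (matched ++ not_matched) none (some k)

-- ===== PORT B =====
-- the boolean sort key: True (sorts last) iff subject_lower is NOT contained in r["subject"].lower()
def pvKeyB (subject_lower : String) (r : List (String × String)) : Bool :=
  !(PySem.Str.isIn subject_lower (PySem.Str.lower (((PySem.Dict.mk r).get? "subject").getD "")))

def filter_by_subject_priority_alt (recommendations : List (List (String × String))) (subject : String) (k : Int) : List (List (String × String)) :=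
  if subject = "" then PySem.List.slice recommendations none (some k)
  else
    let subject_lower := PySem.Str.lower subject
    PySem.List.slice (PySem.List.sorted recommendations (pvKeyB subject_lower) false) none (some k)

-- ===== PRECONDITION & SPEC =====
-- Pre_ excludes exactly the inputs on which the Python raises KeyError: a non-empty subject
-- together with some recommendation lacking the "subject" key.
def Pre_filter_by_subject_priority (recommendations : List (List (String × String))) (subject : String) (k : Int) : Prop :=
  subject = "" ∨ ∀ r ∈ recommendations, ((PySem.Dict.mk r).get? "subject").isSome
instance (recommendations : List (List (String × String))) (subject : String) (k : Int) : Decidable (Pre_filter_by_subject_priority recommendations subject k) := by unfold Pre_filter_by_subject_priority; infer_instance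

def pvWitness_filter_by_subject_priority : (List (List (String × String))) × String × Int :=
  ([[("subject", "Math")], [("subject", "History")]], "math", 1)

def Spec_filter_by_subject_priority (recommendations : List (List (String × String))) (subject : String) (k : Int) (out : List (List (String × String))) : Prop := out = filter_by_subject_priority_alt recommendations subject k
instance (recommendations : List (List (String × String))) (subject : String) (k : Int) (out : List (List (String × String))) : Decidable (Spec_filter_by_subject_priority recommendations subject k out) := by unfold Spec_filter_by_subject_priority; infer_instance

-- ===== CLAIM (what is proved, stated in full; the proofs are below) =====
def Claim_equal_filter_by_subject_priority : Prop := ∀ (recommendations : List (List (String × String))) (subject : String) (k : Int), Dom_filter_by_subject_priority recommendations subject k → Pre_filter_by_subject_priority recommendations subject k → Spec_filter_by_subject_priority recommendations subject k (filter_by_subject_priority recommendations subject k)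

-- ===== LEMMAS AND PROOFS =====

-- Inserting x into m ++ n where every element of m has key false and every element of n has key true:
-- a false-key x lands at the end of m, a true-key x at the very end (stable insertion).
lemma pv_insertBy_split {α : Type} (p : α → Bool) (x : α) (m n : List α)
    (hm : ∀ y ∈ m, p y = true) (hn : ∀ y ∈ n, p y = false) :
    PySem.List.insertBy (fun a b => decide ((!p a) < (!p b))) x (m ++ n) =
      if p x then m ++ x :: n else (m ++ n) ++ [x] := by
  induction m with
  | cons y t ih =>
      have hy : p y = true := hm y (List.mem_cons_self ..)
      have : (decide ((!p x) < (!p y))) = false := by simp [hy, Bool.lt_iff]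
      simp only [List.cons_append, PySem.List.insertBy, this]
      rw [ih (fun z hz => hm z (List.mem_cons_of_mem _ hz))]
      split_ifs <;> simp_all
  | nil =>
      simp only [List.nil_append]
      induction n with
      | nil => cases hpx : p x <;> simp [PySem.List.insertBy]
      | cons y t ihn =>
          have hy : p y = false := hn y (List.mem_cons_self ..)
          cases hpx : p x with
          | true =>
              have : (decide ((!p x) < (!p y))) = true := by simp [hy, hpx]
              simp [PySem.List.insertBy, this]
          | false =>
              have : (decide ((!p x) < (!p y))) = false := by simp [hy, hpx]
              simp only [PySem.List.insertBy, this]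
              rw [ihn (fun z hz => hn z (List.mem_cons_of_mem _ hz))]
              simp [hpx]

-- The insertion-sort fold over xs, started from a split state m ++ n, produces
-- m ++ (matched of xs) ++ (n ++ (unmatched of xs)).
lemma pv_foldl_split {α : Type} (p : α → Bool) (xs m n : List α)
    (hm : ∀ y ∈ m, p y = true) (hn : ∀ y ∈ n, p y = false) :
    xs.foldl (fun acc x => PySem.List.insertBy (fun a b => decide ((!p a) < (!p b))) x acc) (m ++ n) =
      (m ++ xs.filter p) ++ (n ++ xs.filter (fun r => !(p r))) := by
  induction xs generalizing m n with
  | nil => simp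
  | cons x t ih =>
      simp only [List.foldl_cons]
      rw [pv_insertBy_split p x m n hm hn]
      cases hpx : p x with
      | true =>
          rw [if_pos rfl, List.append_cons,
            ih (m ++ [x]) n
              (by intro y hy; rcases List.mem_append.mp hy with h | h
                  · exact hm y h
                  · simp at h; subst h; exact hpx) hn]
          simp [hpx, List.append_assoc]
      | false =>
          rw [if_neg (by simp),
            show (m ++ n) ++ [x] = m ++ (n ++ [x]) from List.append_assoc ..,
            ih m (n ++ [x]) hm
              (by intro y hy; rcases List.mem_append.mp hy with h | h
                  · exact hn y h
                  · simp at h; subst h; exact hpx)]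
          simp [hpx, List.append_assoc]

-- Stable sort by a boolean key is the matched-first partition.
lemma pv_sorted_bool_key {α : Type} (p : α → Bool) (xs : List α) :
    PySem.List.sorted xs (fun r => !(p r)) false =
      xs.filter p ++ xs.filter (fun r => !(p r)) := by
  rw [PySem.List.sorted_eq_foldl_insertBy]
  have := pv_foldl_split p xs [] [] (by simp) (by simp)
  simpa using this

-- ===== VERDICT (by name: the statement is the Claim_ definition above) =====
theorem filter_by_subject_priority_spec : Claim_equal_filter_by_subject_priority := by
  intro recs subject k _ _
  unfold Spec_filter_by_subject_priority filter_by_subject_priority filter_by_subject_priority_alt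
  by_cases hs : subject = ""
  · simp [hs]
  · simp only [hs, if_false]
    have hkey : pvKeyB (PySem.Str.lower subject) = fun r => !(pvMatchA (PySem.Str.lower subject) r) := by
      funext r; rfl
    rw [hkey, pv_sorted_bool_key (pvMatchA (PySem.Str.lower subject)) recs]
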